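-- pv_equiv track=rewrite | github.com/ingabolee/convergence | digits.py | product_of_digits
-- ===== SOURCE A (Python) =====
-- def product_of_digits(n):
--     prod = 1
--     for i in str(n):
--         if i == '0' or i == '1':
--             pass
--         else:
--             prod *= int(i)
--     if len(str(prod)) == 1:
--         return prod
--     else:
--         return product_of_digits(prod)
-- ===== SOURCE B (Python) =====
-- def product_of_digits(n):
--     while True:
--         prod = 1
--         m = n
--         while m > 0:
--             m, d = divmod(m, 10)
--             if d > 1:
--                 prod *= d
--         if prod < 10:
--             return prod
--         n = prod
-- ===== Notes on version B (the rewrite author's own statement) =====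
-- stated objective: alternative
-- what changed: Replaces string-based tail recursion with an iterative while-loop that extracts digits arithmetically via divmod, never converting to a string.
import Mathlib
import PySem

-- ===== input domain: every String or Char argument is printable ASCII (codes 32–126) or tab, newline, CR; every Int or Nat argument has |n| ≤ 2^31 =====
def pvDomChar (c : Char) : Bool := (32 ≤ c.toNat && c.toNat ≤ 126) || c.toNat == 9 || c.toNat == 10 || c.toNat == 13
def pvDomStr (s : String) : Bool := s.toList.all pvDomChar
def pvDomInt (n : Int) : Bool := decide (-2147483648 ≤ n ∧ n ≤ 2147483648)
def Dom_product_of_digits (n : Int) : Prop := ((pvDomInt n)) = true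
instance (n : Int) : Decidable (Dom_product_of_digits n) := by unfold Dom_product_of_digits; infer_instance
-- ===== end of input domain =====

-- B replaces A's string-based tail recursion by an iterative loop extracting digits
-- arithmetically with divmod (objective: alternative decomposition, similar cost).

-- ===== PORT A =====
-- one pass of A's for-loop body: skip '0'/'1', else multiply by int(i)
-- (int(i) = (ofChars? [i]).getD 0; exact on Pre_, where every character is a digit)
def pvAStep (p : Int) (c : Char) : Int :=
  if c = '0' ∨ c = '1' then p else p * (PySem.Int.ofChars? [c]).getD 0

-- prod = 1; for i in str(n): …
def pvAProd (n : Int) : Int := (PySem.Int.toChars n).foldl pvAStep 1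

-- A's tail recursion, made total by a fuel counter (a totality guard only)
def pvALoop : Nat → Int → Int
  | 0, n => n
  | f + 1, n =>
    let prod := pvAProd n
    if (PySem.Int.toChars prod).length = 1 then prod else pvALoop f prod

def product_of_digits (n : Int) : Int := pvALoop (n.toNat + 1) n

-- ===== PORT B =====
-- Source B's inner 'while m > 0: m, d = divmod(m, 10); if d > 1: prod *= d'
def pvBDigits (m : Int) (prod : Int) : Int :=
  if h : 0 < m then
    pvBDigits (PySem.Int.floordiv m 10)
      (if 1 < PySem.Int.mod m 10 then prod * PySem.Int.mod m 10 else prod)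
  else prod
termination_by m.toNat
decreasing_by
  have h10 : PySem.Int.floordiv m 10 = m / 10 := PySem.Int.floordiv_eq_ediv_of_pos (by norm_num)
  rw [h10]
  omega

-- Source B's outer 'while True' loop, made total by the same fuel counter
def pvBLoop : Nat → Int → Int
  | 0, n => n
  | f + 1, n =>
    let prod := pvBDigits n 1
    if prod < 10 then prod else pvBLoop f prod

def product_of_digits_alt (n : Int) : Int := pvBLoop (n.toNat + 1) n

-- ===== PRECONDITION & SPEC =====
-- Pre_ excludes negative n, on which Python A raises ValueError at int('-').
def Pre_product_of_digits (n : Int) : Prop := 0 ≤ n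
instance (n : Int) : Decidable (Pre_product_of_digits n) := by unfold Pre_product_of_digits; infer_instance
def pvWitness_product_of_digits : Int := (39)

def Spec_product_of_digits (n : Int) (out : Int) : Prop := out = product_of_digits_alt n
instance (n : Int) (out : Int) : Decidable (Spec_product_of_digits n out) := by unfold Spec_product_of_digits; infer_instance

-- ===== CLAIM (what is proved, stated in full; the proofs are below) =====
def Claim_equal_product_of_digits : Prop := ∀ (n : Int), Dom_product_of_digits n → Pre_product_of_digits n → Spec_product_of_digits n (product_of_digits n)

-- ===== LEMMAS AND PROOFS =====

-- the common mathematical digit product (skipping digits 0 and 1)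
def pvP (n : Nat) : Int :=
  if h : n = 0 then 1
  else (if 2 ≤ n % 10 then ((n % 10 : Nat) : Int) else 1) * pvP (n / 10)
termination_by n
decreasing_by omega

lemma pvP_pos (n : Nat) : 1 ≤ pvP n := by
  induction n using Nat.strong_induction_on with
  | _ n ih =>
    rw [pvP]
    split
    · norm_num
    · rename_i h
      have hrec := ih (n / 10) (by omega)
      have hfac : (1 : Int) ≤ (if 2 ≤ n % 10 then ((n % 10 : Nat) : Int) else 1) := by
        split <;> [exact_mod_cast Nat.le_of_lt (by omega); norm_num]
      calc (1 : Int) = 1 * 1 := by ring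
        _ ≤ _ := mul_le_mul hfac hrec (by norm_num) (by linarith)

-- accumulator lemma for Nat.toDigitsCore
lemma pvCore_acc (f : Nat) : ∀ (n : Nat) (acc : List Char),
    Nat.toDigitsCore 10 f n acc = Nat.toDigitsCore 10 f n [] ++ acc := by
  induction f with
  | zero => intro n acc; simp [Nat.toDigitsCore]
  | succ f ih =>
    intro n acc
    simp only [Nat.toDigitsCore]
    split
    · simp
    · rw [ih (n / 10) (Nat.digitChar (n % 10) :: acc), ih (n / 10) [Nat.digitChar (n % 10)]]
      simp

-- spending extra fuel is irrelevant once fuel exceeds n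
lemma pvCore_fuel_succ (f : Nat) : ∀ (n : Nat) (acc : List Char), n < f →
    Nat.toDigitsCore 10 (f + 1) n acc = Nat.toDigitsCore 10 f n acc := by
  induction f with
  | zero => intro n acc h; omega
  | succ f ih =>
    intro n acc h
    conv_lhs => rw [Nat.toDigitsCore]
    conv_rhs => rw [Nat.toDigitsCore]
    split
    · rfl
    · rename_i hne
      exact ih (n / 10) _ (by omega)

lemma pvCore_fuel (f n : Nat) (acc : List Char) (h : n < f) :
    Nat.toDigitsCore 10 f n acc = Nat.toDigitsCore 10 (n + 1) n acc := by
  induction f with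
  | zero => omega
  | succ f ih =>
    rcases Nat.lt_or_ge n f with hf | hf
    · rw [pvCore_fuel_succ f n acc hf]; exact ih hf
    · have : n = f := by omega
      subst this; rfl

lemma pvToDigits_small (n : Nat) (h : n < 10) : Nat.toDigits 10 n = [Nat.digitChar n] := by
  simp [Nat.toDigits, Nat.toDigitsCore, Nat.div_eq_of_lt h, Nat.mod_eq_of_lt h]

lemma pvToDigits_step (n : Nat) (h : 10 ≤ n) :
    Nat.toDigits 10 n = Nat.toDigits 10 (n / 10) ++ [Nat.digitChar (n % 10)] := by
  have hne : n / 10 ≠ 0 := by omega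
  conv_lhs => rw [Nat.toDigits, Nat.toDigitsCore]

  rw [if_neg hne, pvCore_fuel n (n / 10) _ (by omega), pvCore_acc]
  rfl

lemma pvToDigits_len_pos (n : Nat) : 1 ≤ (Nat.toDigits 10 n).length := by
  rw [Nat.toDigits, Nat.toDigitsCore]
  split
  · simp
  · rw [pvCore_acc]; simp

lemma pvLen_one_iff (k : Nat) : (Nat.toDigits 10 k).length = 1 ↔ k < 10 := by
  constructor
  · intro h
    by_contra hk
    rw [pvToDigits_step k (by omega), List.length_append] at h
    have := pvToDigits_len_pos (k / 10)
    simp only [List.length_cons, List.length_nil] at h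
    omega
  · intro h; rw [pvToDigits_small k h]; rfl

lemma pvAStep_digitChar (acc : Int) (d : Nat) (h : d < 10) :
    pvAStep acc (Nat.digitChar d) = acc * (if 2 ≤ d then ((d : Nat) : Int) else 1) := by
  have hv : ∀ k : Fin 10, (PySem.Int.ofChars? [Nat.digitChar k.val]).getD 0 = (k.val : Int) := by
    decide
  have hv' := hv ⟨d, h⟩

  interval_cases d <;> simp [pvAStep, Nat.digitChar] at hv' ⊢ <;> simp [hv']

lemma pvFoldA (n : Nat) : ∀ acc : Int, (Nat.toDigits 10 n).foldl pvAStep acc = acc * pvP n := by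
  induction n using Nat.strong_induction_on with
  | _ n ih =>
    intro acc
    rcases Nat.lt_or_ge n 10 with h | h
    · rw [pvToDigits_small n h]
      simp only [List.foldl]
      rw [pvAStep_digitChar acc n h, pvP]
      rcases Nat.eq_zero_or_pos n with h0 | h0
      · subst h0; norm_num
      · have hne : ¬ n = 0 := by omega
        simp only [hne, dite_false]
        rw [Nat.mod_eq_of_lt h, Nat.div_eq_of_lt h, pvP]
        simp
    · rw [pvToDigits_step n h, List.foldl_append]
      simp only [List.foldl]
      rw [ih (n / 10) (by omega) acc, pvAStep_digitChar _ (n % 10) (by omega)]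
      have hne : ¬ n = 0 := by omega
      conv_rhs => rw [pvP]
      rw [dif_neg hne]
      ring

lemma pvLoopB (n : Nat) : ∀ prod : Int, pvBDigits (n : Int) prod = prod * pvP n := by
  induction n using Nat.strong_induction_on with
  | _ n ih =>
    intro prod
    rw [pvBDigits, pvP]
    rcases Nat.eq_zero_or_pos n with h0 | h0
    · subst h0; simp
    · have hpos : (0 : Int) < (n : Int) := by exact_mod_cast h0
      have hne : ¬ n = 0 := by omega
      simp only [hpos, dite_true, hne, dite_false]
      have hf : PySem.Int.floordiv (n : Int) 10 = ((n / 10 : Nat) : Int) := by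
        exact_mod_cast PySem.Int.floordiv_natCast n 10
      have hm : PySem.Int.mod (n : Int) 10 = ((n % 10 : Nat) : Int) := by
        exact_mod_cast PySem.Int.mod_natCast n 10
      rw [hf, hm, ih (n / 10) (by omega)]
      have hcast : (1 : Int) < ((n % 10 : Nat) : Int) ↔ 2 ≤ n % 10 := by
        constructor <;> intro hx <;> exact_mod_cast hx
      by_cases hd : 2 ≤ n % 10
      · simp only [hcast.mpr hd, if_pos, hd]
        ring
      · have hdi : ¬ (1 : Int) < ((n % 10 : Nat) : Int) := fun hx => hd (hcast.mp hx)
        simp only [hdi, if_false, hd]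
        ring

lemma pvPass (n : Int) (h : 0 ≤ n) : pvAProd n = pvP n.toNat ∧ pvBDigits n 1 = pvP n.toNat := by
  have hcast : (n.toNat : Int) = n := Int.toNat_of_nonneg h
  constructor
  · unfold pvAProd
    have : PySem.Int.toChars n = Nat.toDigits 10 n.toNat := by
      simp [PySem.Int.toChars, not_lt.mpr h]
    rw [this, pvFoldA n.toNat 1, one_mul]
  · have hb := pvLoopB n.toNat 1
    rw [hcast] at hb
    rw [hb, one_mul]

lemma pvLoopEq (f : Nat) : ∀ n : Int, 0 ≤ n → pvALoop f n = pvBLoop f n := by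
  induction f with
  | zero => intro n _; rfl
  | succ f ih =>
    intro n hn
    obtain ⟨hA, hB⟩ := pvPass n hn
    have hp1 : 1 ≤ pvP n.toNat := pvP_pos n.toNat
    simp only [pvALoop, pvBLoop, hA, hB]
    have hlen : (PySem.Int.toChars (pvP n.toNat)).length = 1 ↔ pvP n.toNat < 10 := by
      have hnn : (0 : Int) ≤ pvP n.toNat := by linarith
      have : PySem.Int.toChars (pvP n.toNat) = Nat.toDigits 10 (pvP n.toNat).toNat := by
        simp [PySem.Int.toChars, Int.not_lt.mpr hnn]
      rw [this, pvLen_one_iff]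
      omega
    by_cases hsmall : pvP n.toNat < 10
    · simp [hlen.mpr hsmall, hsmall]
    · simp only [hsmall, if_false]
      rw [if_neg (by rw [hlen]; exact hsmall)]
      exact ih (pvP n.toNat) (by linarith)

-- ===== VERDICT (by name: the statement is the Claim_ definition above) =====
theorem product_of_digits_spec : Claim_equal_product_of_digits := by
  intro n _ hpre
  unfold Spec_product_of_digits product_of_digits product_of_digits_alt
  exact pvLoopEq (n.toNat + 1) n hpre
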